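-- pv_equiv track=rewrite | github.com/minnseong/Algorithm | programmers/Level 1/mockTest.py | solution
-- ===== SOURCE A (Python) =====
-- def solution(answers):
--     answer = []
--     score = [0, 0, 0]
--     student_1 = [1, 2, 3, 4, 5]
--     student_2 = [2, 1, 2, 3, 2, 4, 2, 5]
--     student_3 = [3, 3, 1, 1, 2, 2, 4, 4, 5, 5]
--
--     for i in range(0, len(answers)):
--         if answers[i] == student_1[i % len(student_1)]:
--             score[0] += 1
--         if answers[i] == student_2[i % len(student_2)]:
--             score[1] += 1
--         if answers[i] == student_3[i % len(student_3)]: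
--             score[2] += 1
--
--     winner = max(score[0], score[1], score[2])
--
--     if winner == score[0]:
--         answer.append(1)
--     if winner == score[1]:
--         answer.append(2)
--     if winner == score[2]:
--         answer.append(3)
--
--     return answer
-- ===== SOURCE B (Python) =====
-- def solution(answers):
--     # Histogram approach: one pass builds counts of (position mod 40, answer) pairs
--     # (40 = lcm of the three pattern periods), then each pattern's score is just
--     # 40 table lookups instead of a comparison per answer.
--     freq = {}
--     for i, a in enumerate(answers):
--         key = (i % 40, a)
--         freq[key] = freq.get(key, 0) + 1
--     patterns = [[1, 2, 3, 4, 5],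
--                 [2, 1, 2, 3, 2, 4, 2, 5],
--                 [3, 3, 1, 1, 2, 2, 4, 4, 5, 5]]
--     scores = [sum(freq.get((r, p[r % len(p)]), 0) for r in range(40))
--               for p in patterns]
--     best = max(scores)
--     return [i + 1 for i, s in enumerate(scores) if s == best]
-- ===== Notes on version B (the rewrite author's own statement) =====
-- stated objective: alternative
-- what changed: Replaces A's per-answer comparison against all three cyclic patterns by a histogram: one pass counts (index mod 40, answer) pairs (40 = lcm of the pattern periods 5, 8, 10), then each pattern's score is obtained by 40 table lookups; the max/top-index tail is data-driven over a score list instead of chained ifs.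
import Mathlib
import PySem

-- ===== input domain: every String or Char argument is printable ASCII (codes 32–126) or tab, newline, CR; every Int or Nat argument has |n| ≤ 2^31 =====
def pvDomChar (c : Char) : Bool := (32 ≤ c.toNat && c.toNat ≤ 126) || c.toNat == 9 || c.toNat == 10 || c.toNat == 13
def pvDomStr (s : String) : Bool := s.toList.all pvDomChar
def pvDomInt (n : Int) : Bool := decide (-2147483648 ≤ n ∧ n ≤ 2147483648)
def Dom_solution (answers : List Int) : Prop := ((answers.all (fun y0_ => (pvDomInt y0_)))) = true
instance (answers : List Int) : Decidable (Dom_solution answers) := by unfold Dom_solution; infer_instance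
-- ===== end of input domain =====

-- B replaces A's per-answer comparisons against the three patterns by a histogram: one pass
-- counts (index mod 40, answer) pairs (40 = lcm of the pattern periods), then each pattern's
-- score is 40 table lookups; same tie handling and order (objective: alternative).

-- ===== PORT A =====
def solution (answers : List Int) : List Int :=
  let student1 : List Int := [1, 2, 3, 4, 5]
  let student2 : List Int := [2, 1, 2, 3, 2, 4, 2, 5]
  let student3 : List Int := [3, 3, 1, 1, 2, 2, 4, 4, 5, 5]
  let score :=
    (PySem.List.pyRange 0 (answers.length : Int) 1).foldl
      (fun (s : Int × Int × Int) i =>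
        ((if PySem.List.pyGetD answers i 0
            = PySem.List.pyGetD student1 (PySem.Int.mod i (student1.length : Int)) 0
          then s.1 + 1 else s.1),
         (if PySem.List.pyGetD answers i 0
            = PySem.List.pyGetD student2 (PySem.Int.mod i (student2.length : Int)) 0
          then s.2.1 + 1 else s.2.1),
         (if PySem.List.pyGetD answers i 0
            = PySem.List.pyGetD student3 (PySem.Int.mod i (student3.length : Int)) 0
          then s.2.2 + 1 else s.2.2)))
      (0, 0, 0)
  let winner := max (max score.1 score.2.1) score.2.2
  ((if winner = score.1 then [(1 : Int)] else []) ++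
    (if winner = score.2.1 then [(2 : Int)] else [])) ++
    (if winner = score.2.2 then [(3 : Int)] else [])

-- ===== PORT B =====
def solution_alt (answers : List Int) : List Int :=
  let freq : PySem.Dict (Int × Int) Int :=
    (PySem.List.enumerate answers).foldl
      (fun d ia =>
        d.insert (PySem.Int.mod ia.1 40, ia.2)
          (d.getD (PySem.Int.mod ia.1 40, ia.2) 0 + 1))
      PySem.Dict.empty
  let patterns : List (List Int) :=
    [[1, 2, 3, 4, 5], [2, 1, 2, 3, 2, 4, 2, 5], [3, 3, 1, 1, 2, 2, 4, 4, 5, 5]]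
  let scores := patterns.map (fun p =>
    ((PySem.List.pyRange 0 40 1).map
      (fun r => freq.getD (r, PySem.List.pyGetD p (PySem.Int.mod r (p.length : Int)) 0) 0)).sum)
  let best := (PySem.List.max? scores id).getD 0
  (PySem.List.enumerate scores).filterMap
    (fun is => if is.2 = best then some (is.1 + 1) else none)

-- ===== PRECONDITION & SPEC =====
def Spec_solution (answers : List Int) (out : List Int) : Prop := out = solution_alt answers
instance (answers : List Int) (out : List Int) : Decidable (Spec_solution answers out) := by unfold Spec_solution; infer_instance

-- ===== CLAIM (what is proved, stated in full; the proofs are below) =====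
def Claim_equal_solution : Prop := ∀ (answers : List Int), Dom_solution answers → Spec_solution answers (solution answers)

-- ===== LEMMAS AND PROOFS =====

-- Python's max of a literal three-element list is the nested binary max A computes.
lemma max3_getD (a b c : Int) : (PySem.List.max? [a, b, c] id).getD 0 = max (max a b) c := by
  simp only [PySem.List.max?, List.foldl, id]
  split_ifs <;> simp only [Option.getD] <;> (try split_ifs) <;> simp_all [max_def] <;> omega

-- enumerate(xs, s) lists (s + k, xs[k]) for k below len(xs).
lemma enumerate_eq_range (xs : List Int) : ∀ s : Nat,
    PySem.List.enumerate xs (s : Int)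
      = (List.range xs.length).map (fun k => (((s + k : Nat) : Int), xs.getD k 0)) := by
  induction xs with
  | nil => intro s; simp [PySem.List.enumerate]
  | cons x t ih =>
    intro s
    rw [PySem.List.enumerate_cons]
    have h1 : ((s : Int) + 1) = ((s + 1 : Nat) : Int) := by push_cast; ring
    rw [h1, ih (s + 1)]
    simp [List.range_succ_eq_map, List.map_map, Function.comp_def]
    intro a _; ring

-- A's one fused fold with a triple accumulator is the triple of the three component folds.
lemma foldl_triple {beta : Type} (f g h : Int → beta → Int) (l : List beta) :
    ∀ (a b c : Int),
    l.foldl (fun (s : Int × Int × Int) i => (f s.1 i, g s.2.1 i, h s.2.2 i)) (a, b, c)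
      = (l.foldl f a, l.foldl g b, l.foldl h c) := by
  induction l with
  | nil => intro a b c; rfl
  | cons x t ih => intro a b c; simp only [List.foldl_cons]; exact ih _ _ _

-- One counter of A's fused index loop equals the 0/1-sum over enumerate for the same pattern.
lemma fold_eq_sum (p : List Int) (xs : List Int) :
    (PySem.List.pyRange 0 (xs.length : Int) 1).foldl
      (fun s i => if PySem.List.pyGetD xs i 0
          = PySem.List.pyGetD p (PySem.Int.mod i (p.length : Int)) 0 then s + 1 else s) 0
    = ((PySem.List.enumerate xs).map
        (fun ia => if ia.2 = PySem.List.pyGetD p (PySem.Int.mod ia.1 (p.length : Int)) 0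
          then (1 : Int) else 0)).sum := by
  have e0 : PySem.List.enumerate xs = PySem.List.enumerate xs ((0 : Nat) : Int) := by norm_num
  rw [PySem.List.pyRange_one, e0, enumerate_eq_range xs 0]
  simp only [List.foldl_map, List.map_map, Function.comp_def,
    Int.sub_zero, zero_add, Int.toNat_natCast, PySem.List.pyGetD_natCast]
  have h : (fun (s : Int) (k : Nat) =>
      if xs.getD k 0 = PySem.List.pyGetD p (PySem.Int.mod (k : Int) (p.length : Int)) 0
      then s + 1 else s)
    = (fun s k => s + (if xs.getD k 0
        = PySem.List.pyGetD p (PySem.Int.mod (k : Int) (p.length : Int)) 0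
        then (1 : Int) else 0)) := by
    funext s k; split <;> ring
  rw [h, PySem.List.foldl_add]
  simp

-- Over a duplicate-free list of residues, the indicator of 'k is (r, f r) for some listed r'
-- sums to 1 or 0 according to whether k's residue is listed and its value matches.
lemma sum_ite_single (R : List Int) (hR : R.Nodup) (k : Int × Int) (f : Int → Int) :
    (R.map (fun r => if (r, f r) = k then (1 : Int) else 0)).sum
      = if k.1 ∈ R ∧ k.2 = f k.1 then 1 else 0 := by
  induction R with
  | nil => simp
  | cons r R ih =>
    simp only [List.nodup_cons] at hR
    by_cases hx : (r, f r) = k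
    · have h1 : k.1 = r := by rw [← hx]
      have h2 : k.2 = f k.1 := by rw [h1, ← hx]
      have h3 : ¬ (k.1 ∈ R ∧ k.2 = f k.1) := fun h => hR.1 (h1 ▸ h.1)
      simp only [List.map_cons, List.sum_cons, if_pos hx, ih hR.2, if_neg h3]
      simp [h1, h2]
    · have h3 : ¬ (k.1 = r ∧ k.2 = f k.1) := by
        rintro ⟨hm, hv⟩
        rw [hm] at hv
        exact hx (Prod.ext hm.symm hv.symm)
      simp only [List.map_cons, List.sum_cons, if_neg hx, ih hR.2, List.mem_cons,
        zero_add, or_and_right]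
      by_cases h4 : k.1 ∈ R ∧ k.2 = f k.1 <;> simp [h3, h4]

-- Counting keys into a dict one by one adds, lookup-wise, one indicator per key to the sums.
lemma hist_sum (f : Int → Int) (R : List Int) (hR : R.Nodup) (keys : List (Int × Int)) :
    ∀ d : PySem.Dict (Int × Int) Int,
    (R.map (fun r =>
        (keys.foldl (fun d x => d.insert x (d.getD x 0 + 1)) d).getD (r, f r) 0)).sum
      = (R.map (fun r => d.getD (r, f r) 0)).sum
        + (keys.map (fun k => if k.1 ∈ R ∧ k.2 = f k.1 then (1 : Int) else 0)).sum := by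
  induction keys with
  | nil => intro d; simp
  | cons k keys ih =>
    intro d
    simp only [List.foldl_cons, List.map_cons, List.sum_cons]
    rw [ih]
    have hstep : ∀ r : Int,
        (d.insert k (d.getD k 0 + 1)).getD (r, f r) 0
          = d.getD (r, f r) 0 + (if (r, f r) = k then (1 : Int) else 0) := by
      intro r
      by_cases h : (r, f r) = k
      · rw [h, PySem.Dict.getD_insert_self]; simp
      · rw [PySem.Dict.getD_insert_of_ne _ _ _ h]; simp [h]
    simp only [hstep]
    rw [PySem.List.sum_map_add_int, sum_ite_single R hR k f]
    ring

-- mod 40 then mod the pattern length is mod the pattern length, the length dividing 40.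
lemma modmod (i L : Int) (hL : 0 < L) (hdvd : L ∣ 40) :
    PySem.Int.mod (PySem.Int.mod i 40) L = PySem.Int.mod i L := by
  rw [PySem.Int.mod_eq_emod_of_pos (by norm_num : (0:Int) < 40),
    PySem.Int.mod_eq_emod_of_pos hL, PySem.Int.mod_eq_emod_of_pos hL]
  exact Int.emod_emod_of_dvd i hdvd

-- B's 40 histogram lookups for one pattern recover the 0/1-sum over enumerate.
lemma hist_score (answers p : List Int) (hL : 0 < (p.length : Int))
    (hdvd : (p.length : Int) ∣ 40) :
    ((PySem.List.pyRange 0 40 1).map (fun r =>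
        ((PySem.List.enumerate answers).foldl
          (fun d ia =>
            d.insert (PySem.Int.mod ia.1 40, ia.2)
              (d.getD (PySem.Int.mod ia.1 40, ia.2) 0 + 1))
          PySem.Dict.empty).getD
          (r, PySem.List.pyGetD p (PySem.Int.mod r (p.length : Int)) 0) 0)).sum
    = ((PySem.List.enumerate answers).map
        (fun ia => if ia.2 = PySem.List.pyGetD p (PySem.Int.mod ia.1 (p.length : Int)) 0
          then (1 : Int) else 0)).sum := by
  rw [show (PySem.List.enumerate answers).foldl
        (fun (d : PySem.Dict (Int × Int) Int) ia =>
          d.insert (PySem.Int.mod ia.1 40, ia.2)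
            (d.getD (PySem.Int.mod ia.1 40, ia.2) 0 + 1))
        PySem.Dict.empty
      = ((PySem.List.enumerate answers).map (fun ia => (PySem.Int.mod ia.1 40, ia.2))).foldl
          (fun d x => d.insert x (d.getD x 0 + 1)) PySem.Dict.empty
      from (@List.foldl_map (Int × Int) (Int × Int) (PySem.Dict (Int × Int) Int)
        (fun ia => (PySem.Int.mod ia.1 40, ia.2))
        (fun d x => d.insert x (d.getD x 0 + 1))
        (PySem.List.enumerate answers) PySem.Dict.empty).symm,
    hist_sum (fun r => PySem.List.pyGetD p (PySem.Int.mod r (p.length : Int)) 0)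
      (PySem.List.pyRange 0 40 1) (PySem.List.nodup_pyRange_one 0 40) _ PySem.Dict.empty]
  have hempty : ((PySem.List.pyRange 0 40 1).map
      (fun r => (PySem.Dict.empty : PySem.Dict (Int × Int) Int).getD
        (r, PySem.List.pyGetD p (PySem.Int.mod r (p.length : Int)) 0) 0)).sum = 0 := by
    simp [PySem.Dict.getD, PySem.Dict.get?, PySem.Dict.empty]
  rw [hempty, zero_add, List.map_map]
  refine congrArg List.sum (List.map_congr_left (fun ia _ => ?_))
  simp only [Function.comp_def]
  have hmem : PySem.Int.mod ia.1 40 ∈ PySem.List.pyRange 0 40 1 := by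
    rw [PySem.List.mem_pyRange_one]
    exact ⟨PySem.Int.mod_nonneg _ (by norm_num), PySem.Int.mod_lt _ (by norm_num)⟩
  simp only [hmem, true_and, modmod ia.1 (p.length : Int) hL hdvd]

-- A's three max-equality appends agree with B's top-index comprehension over the score list.
lemma tail_eq (s1 s2 s3 : Int) :
    ((if max (max s1 s2) s3 = s1 then [(1 : Int)] else []) ++
      (if max (max s1 s2) s3 = s2 then [(2 : Int)] else [])) ++
      (if max (max s1 s2) s3 = s3 then [(3 : Int)] else [])
    = (PySem.List.enumerate [s1, s2, s3]).filterMap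
        (fun is => if is.2 = (PySem.List.max? [s1, s2, s3] id).getD 0
          then some (is.1 + 1) else none) := by
  rw [max3_getD]
  simp only [PySem.List.enumerate_cons, PySem.List.enumerate_nil]
  norm_num [List.filterMap]
  simp only [max_def]
  split_ifs <;> first | rfl | omega

-- ===== VERDICT (by name: the statement is the Claim_ definition above) =====
theorem solution_spec : Claim_equal_solution := by
  intro answers _
  unfold Spec_solution solution solution_alt
  simp only []
  rw [foldl_triple
      (fun (t : Int) i => if PySem.List.pyGetD answers i 0
          = PySem.List.pyGetD [1,2,3,4,5] (PySem.Int.mod i (([1,2,3,4,5] : List Int).length : Int)) 0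
        then t + 1 else t)
      (fun (t : Int) i => if PySem.List.pyGetD answers i 0
          = PySem.List.pyGetD [2,1,2,3,2,4,2,5] (PySem.Int.mod i (([2,1,2,3,2,4,2,5] : List Int).length : Int)) 0
        then t + 1 else t)
      (fun (t : Int) i => if PySem.List.pyGetD answers i 0
          = PySem.List.pyGetD [3,3,1,1,2,2,4,4,5,5] (PySem.Int.mod i (([3,3,1,1,2,2,4,4,5,5] : List Int).length : Int)) 0
        then t + 1 else t)]
  rw [fold_eq_sum, fold_eq_sum, fold_eq_sum]
  simp only [List.map_cons, List.map_nil]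
  simp only [hist_score answers [1,2,3,4,5] (by norm_num) (by norm_num),
    hist_score answers [2,1,2,3,2,4,2,5] (by norm_num) (by norm_num),
    hist_score answers [3,3,1,1,2,2,4,4,5,5] (by norm_num) (by norm_num)]
  exact tail_eq _ _ _
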